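-- pv_equiv track=rewrite | github.com/GerbendH/Advent_of_Code_2020 | Day 6/main.py | count_answers
-- ===== SOURCE A (Python) =====
-- def count_answers(group_answers):
--     checklist = "abcdefghijklmnopqrstuvwxyz"
--     count = 0
--
--     group_answers_list = group_answers.split()
--
--     for question in checklist:
--         question_check = True
--
--         for individual in group_answers_list:
--             if question not in individual:
--                 question_check = False
--
--         if question_check:
--             count += 1
--
--     return count
-- ===== SOURCE B (Python) =====
-- def count_answers(group_answers):
--     acc = set("abcdefghijklmnopqrstuvwxyz")
--     for word in group_answers.split():
--         acc &= set(word)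
--     return len(acc)
-- ===== Notes on version B (the rewrite author's own statement) =====
-- stated objective: idiomatic
-- what changed: Replaces the 26-letter outer loop with an inner scan over every word by a single pass that folds set intersection over the words, starting from the full lowercase alphabet.
import Mathlib
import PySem

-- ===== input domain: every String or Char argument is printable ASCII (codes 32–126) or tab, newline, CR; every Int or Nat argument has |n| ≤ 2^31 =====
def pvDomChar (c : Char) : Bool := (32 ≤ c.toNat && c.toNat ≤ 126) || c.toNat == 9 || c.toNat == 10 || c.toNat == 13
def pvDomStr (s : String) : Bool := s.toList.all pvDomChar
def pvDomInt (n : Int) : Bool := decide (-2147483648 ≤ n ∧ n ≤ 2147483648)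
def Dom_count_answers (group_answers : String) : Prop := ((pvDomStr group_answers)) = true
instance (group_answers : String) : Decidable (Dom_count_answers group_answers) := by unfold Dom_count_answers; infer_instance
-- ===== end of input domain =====

-- B folds a set intersection over the words starting from the alphabet, instead of A's
-- 26-letter outer loop each scanning every word (objective: idiomatic single pass).

-- ===== PORT A =====
def count_answers (group_answers : String) : Int :=
  let checklist := "abcdefghijklmnopqrstuvwxyz"
  let group_answers_list := PySem.Str.split₀ group_answers
  checklist.toList.foldl (fun count question =>
    let question_check := group_answers_list.foldl (fun qc individual =>
      if PySem.Str.isIn (String.ofList [question]) individual = false then false else qc) true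
    if question_check then count + 1 else count) 0

-- ===== PORT B =====
def count_answers_alt (group_answers : String) : Int :=
  let acc : PySem.Set Char := PySem.Set.ofList "abcdefghijklmnopqrstuvwxyz".toList
  let acc := (PySem.Str.split₀ group_answers).foldl
    (fun acc word => PySem.Set.inter acc (PySem.Set.ofList word.toList)) acc
  PySem.Set.len acc

-- ===== PRECONDITION & SPEC =====
def Spec_count_answers (group_answers : String) (out : Int) : Prop := out = count_answers_alt group_answers
instance (group_answers : String) (out : Int) : Decidable (Spec_count_answers group_answers out) := by unfold Spec_count_answers; infer_instance

-- ===== CLAIM (what is proved, stated in full; the proofs are below) =====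
def Claim_equal_count_answers : Prop := ∀ (group_answers : String), Dom_count_answers group_answers → Spec_count_answers group_answers (count_answers group_answers)

-- ===== LEMMAS AND PROOFS =====

-- a one-character string is a substring iff the character occurs
theorem singleton_isIn_iff (q : Char) (w : String) :
    PySem.Str.isIn (String.ofList [q]) w = true ↔ q ∈ w.toList := by
  rw [PySem.Str.isIn, String.toList_ofList, PySem.Chars.isIn_iff_infix]
  constructor
  · intro h
    exact h.sublist.subset (List.mem_singleton_self q)
  · intro h
    obtain ⟨l₁, l₂, he⟩ := List.append_of_mem h
    exact ⟨l₁, l₂, by rw [he]; simp⟩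

-- A's inner loop computes "every word contains q"
theorem inner_foldl_eq_all (q : Char) (ws : List String) (b : Bool) :
    ws.foldl (fun qc individual =>
      if PySem.Str.isIn (String.ofList [q]) individual = false then false else qc) b
    = (b && ws.all (fun w => PySem.Str.isIn (String.ofList [q]) w)) := by
  induction ws generalizing b with
  | nil => simp
  | cons w ws ih =>
    simp only [List.foldl_cons, List.all_cons, ih]
    cases h : PySem.Str.isIn (String.ofList [q]) w
    · simp
    · simp

-- A's outer loop counts the letters passing the test
theorem count_foldl_eq_filter (p : Char → Bool) (cs : List Char) (acc : Int) :
    cs.foldl (fun count q => if p q then count + 1 else count) acc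
    = acc + (cs.filter p).length := by
  induction cs generalizing acc with
  | nil => simp
  | cons c cs ih =>
    by_cases h : p c
    · simp [h, ih]; omega
    · simp [h, ih]

-- B's fold of intersections filters the initial set by "contained in every word"
theorem foldl_inter_eq_filter (ws : List String) (s : PySem.Set Char) :
    ws.foldl (fun acc word => PySem.Set.inter acc (PySem.Set.ofList word.toList)) s
    = s.filter (fun q => ws.all (fun w => (PySem.Set.ofList w.toList).contains q)) := by
  induction ws generalizing s with
  | nil => simp
  | cons w ws ih =>
    rw [List.foldl_cons, ih, PySem.Set.inter, List.filter_filter]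
    exact List.filter_congr fun q _ => by rw [List.all_cons, Bool.and_comm]

theorem mem_ofList_toList (q : Char) (w : String) :
    (PySem.Set.ofList w.toList).contains q = true ↔ q ∈ w.toList := by
  rw [PySem.Set.contains_iff, PySem.Set.mem_ofList]

-- ===== VERDICT (by name: the statement is the Claim_ definition above) =====
theorem count_answers_spec : Claim_equal_count_answers := by
  intro s _
  unfold Spec_count_answers count_answers count_answers_alt
  simp only [inner_foldl_eq_all, Bool.true_and, count_foldl_eq_filter,
    foldl_inter_eq_filter, PySem.Set.len, zero_add]
  rw [show PySem.Set.ofList "abcdefghijklmnopqrstuvwxyz".toList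
        = "abcdefghijklmnopqrstuvwxyz".toList by decide]
  refine congrArg _ (congrArg List.length (List.filter_congr fun q _ => ?_))
  rw [Bool.eq_iff_iff, List.all_eq_true, List.all_eq_true]
  exact forall_congr' fun w => imp_congr_right fun _ =>
    (singleton_isIn_iff q w).trans (mem_ofList_toList q w).symm
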